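-- pv_equiv track=rewrite | github.com/bpevangelista/ai_chat7b | src/inference-server/personas.py | _make_safe_history
-- ===== SOURCE A (Python) =====
-- def _make_safe_history(chat_history: list[str], max_history_words: int = 960) -> str:
--     flatten_chat_history = ''
--     total_word_count = 0
--
--     reversed_chat = list(reversed(chat_history))
--     for reply, prompt in zip(reversed_chat[::2], reversed_chat[1::2]):
--         #prompt_reply = "\n".join([prompt, reply])
--         word_count = len(prompt.split()) + len(reply.split())
--         if word_count + total_word_count > max_history_words:
--             break
--         #flatten_chat_history = prompt_reply + flatten_chat_history
--         #flatten_chat_history = f'### Instruction:\n{prompt}\n### Response:\n{reply}\n' + flatten_chat_history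
--
--         #flatten_chat_history = f'[INST] {prompt} [/INST]{reply}\n' + flatten_chat_history
--         flatten_chat_history = f'\n{prompt} {reply}\n' + flatten_chat_history
--
--         total_word_count = total_word_count + word_count
--
--     if flatten_chat_history:
--         flatten_chat_history = flatten_chat_history + '\n'
--
--     return flatten_chat_history
-- ===== SOURCE B (Python) =====
-- def _make_safe_history(chat_history: list[str], max_history_words: int = 960) -> str:
--     # Pair the history chronologically (an odd leading message is unpaired and dropped).
--     n = len(chat_history)
--     pairs = [(chat_history[n % 2 + 2 * j], chat_history[n % 2 + 2 * j + 1])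
--              for j in range(n // 2)]
--     counts = [len(p.split()) + len(r.split()) for p, r in pairs]
--     total = sum(counts)
--
--     # Drop oldest pairs while the remaining total still exceeds the budget.
--     j = 0
--     while j < len(pairs) and total > max_history_words:
--         total -= counts[j]
--         j += 1
--
--     parts = ['\n%s %s\n' % (p, r) for p, r in pairs[j:]]
--     if parts:
--         parts.append('\n')
--     return ''.join(parts)
-- ===== Notes on version B (the rewrite author's own statement) =====
-- stated objective: faster
-- what changed: Instead of A's newest-first accumulate-until-overflow loop with repeated string prepending, B pairs the history chronologically (no reversal), sums all pair word counts once, drops oldest pairs while the remaining total exceeds the budget (valid because word counts are non-negative, so suffix totals are monotone), and renders the kept suffix with a single join.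
import Mathlib
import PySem

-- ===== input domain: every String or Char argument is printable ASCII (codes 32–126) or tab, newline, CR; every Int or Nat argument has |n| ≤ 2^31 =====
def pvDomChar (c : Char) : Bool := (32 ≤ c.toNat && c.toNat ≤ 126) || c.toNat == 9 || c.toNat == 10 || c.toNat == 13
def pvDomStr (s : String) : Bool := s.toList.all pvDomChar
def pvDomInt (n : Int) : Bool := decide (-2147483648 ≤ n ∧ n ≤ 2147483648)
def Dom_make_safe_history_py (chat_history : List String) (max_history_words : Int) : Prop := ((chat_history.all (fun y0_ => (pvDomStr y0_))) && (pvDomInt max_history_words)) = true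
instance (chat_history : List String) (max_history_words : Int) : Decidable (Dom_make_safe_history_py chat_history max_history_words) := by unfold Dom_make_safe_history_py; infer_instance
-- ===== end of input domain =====

-- B pairs the history chronologically (no reversal), sums all word counts once, and drops oldest
-- pairs while the remaining total exceeds the budget — instead of A's newest-first accumulate-and-break
-- with repeated string prepending; the single join also avoids re-copying the accumulator.

-- ===== PORT A =====
-- A's for-loop with break; state = (flatten_chat_history, total_word_count)
def pvALoop (m : Int) : List (String × String) → String → Int → String
  | [], acc, _ => acc
  | (reply, prompt) :: rest, acc, total =>
    let wc : Int := ((PySem.Str.split₀ prompt).length + (PySem.Str.split₀ reply).length : Nat)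
    if wc + total > m then acc
    else pvALoop m rest ("\n" ++ prompt ++ " " ++ reply ++ "\n" ++ acc) (total + wc)

def make_safe_history_py (chat_history : List String) (max_history_words : Int) : String :=
  let reversed_chat := chat_history.reverse
  let evens := (PySem.List.slice? reversed_chat none none 2).getD []
  let odds := (PySem.List.slice? reversed_chat (some 1) none 2).getD []
  let flat := pvALoop max_history_words (evens.zip odds) "" 0
  if flat = "" then flat else flat ++ "\n"

-- ===== PORT B =====
-- word count of one (prompt, reply) pair
def pvWc (p r : String) : Int := ((PySem.Str.split₀ p).length + (PySem.Str.split₀ r).length : Nat)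

-- Source B's while loop: number of oldest pairs dropped while the remaining total exceeds the budget
def pvDropOld (m : Int) : List Int → Int → Nat
  | [], _ => 0
  | c :: rest, total => if total > m then pvDropOld m rest (total - c) + 1 else 0

def make_safe_history_py_alt (chat_history : List String) (max_history_words : Int) : String :=
  let n := chat_history.length
  let pairs := (List.range (n / 2)).map (fun (j : Nat) =>
    (PySem.List.pyGetD chat_history ((n % 2 + 2 * j : Nat) : Int) "",
     PySem.List.pyGetD chat_history ((n % 2 + 2 * j + 1 : Nat) : Int) ""))
  let counts := pairs.map (fun pr => pvWc pr.1 pr.2)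
  let j := pvDropOld max_history_words counts counts.sum
  let parts := (pairs.drop j).map (fun pr => "\n" ++ pr.1 ++ " " ++ pr.2 ++ "\n")
  let parts2 := if parts = [] then parts else parts ++ ["\n"]
  PySem.Str.join "" parts2

-- ===== PRECONDITION & SPEC =====
def Spec_make_safe_history_py (chat_history : List String) (max_history_words : Int) (out : String) : Prop := out = make_safe_history_py_alt chat_history max_history_words
instance (chat_history : List String) (max_history_words : Int) (out : String) : Decidable (Spec_make_safe_history_py chat_history max_history_words out) := by unfold Spec_make_safe_history_py; infer_instance

-- ===== CLAIM (what is proved, stated in full; the proofs are below) =====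
def Claim_equal_make_safe_history_py : Prop := ∀ (chat_history : List String) (max_history_words : Int), Dom_make_safe_history_py chat_history max_history_words → Spec_make_safe_history_py chat_history max_history_words (make_safe_history_py chat_history max_history_words)

-- ===== LEMMAS AND PROOFS =====
def everyOther {α : Type} : List α → List α
  | [] => []
  | [x] => [x]
  | x :: _ :: t => x :: everyOther t

lemma filterMap_even {α : Type} (xs : List α) :
    (List.range ((xs.length + 1) / 2)).filterMap (fun (k : Nat) => xs[(2 * (k : Int)).toNat]?) =
      everyOther xs := by
  induction xs using everyOther.induct with
  | case1 => simp [everyOther]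
  | case2 x => simp [everyOther]
  | case3 x y t ih =>
    have h2 : ((x :: y :: t).length + 1) / 2 = (t.length + 1) / 2 + 1 := by simp; omega
    rw [h2, List.range_succ_eq_map, List.filterMap_cons, List.filterMap_map]
    have hf : (fun (k : Nat) => (x :: y :: t)[(2 * ((k.succ : Nat) : Int)).toNat]?) =
        (fun (k : Nat) => t[(2 * (k : Int)).toNat]?) := by
      funext k
      have h3 : (2 * ((k.succ : Nat) : Int)).toNat = (2 * (k : Int)).toNat + 2 := by omega
      rw [h3]
      simp
    simp only [Function.comp_def] at *
    rw [hf, ih]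
    simp [everyOther]

lemma filterMap_odd {α : Type} (xs : List α) :
    (List.range (xs.length / 2)).filterMap (fun (k : Nat) => xs[(1 + 2 * (k : Int)).toNat]?) =
      everyOther xs.tail := by
  cases xs with
  | nil => simp [everyOther]
  | cons x t =>
    have h2 : (x :: t).length / 2 = (t.length + 1) / 2 := by simp
    have hf : (fun (k : Nat) => (x :: t)[(1 + 2 * (k : Int)).toNat]?) =
        (fun (k : Nat) => t[(2 * (k : Int)).toNat]?) := by
      funext k
      have h3 : (1 + 2 * (k : Int)).toNat = (2 * (k : Int)).toNat + 1 := by omega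
      rw [h3]; simp
    rw [h2, hf, filterMap_even]
    simp

lemma slice_even {α : Type} (xs : List α) :
    PySem.List.slice? xs none none 2 = some (everyOther xs) := by
  simp only [PySem.List.slice?, PySem.List.sliceIndices]
  norm_num
  rcases Nat.eq_zero_or_pos xs.length with h | h
  · rw [if_neg (by omega)]
    have : xs = [] := List.eq_nil_of_length_eq_zero h
    subst this; simp [everyOther]
  · rw [if_pos (by omega)]
    have hc : (((xs.length : Int) + 2 - 1) / 2).toNat = (xs.length + 1) / 2 := by omega
    rw [hc, filterMap_even]

lemma slice_odd {α : Type} (xs : List α) :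
    PySem.List.slice? xs (some 1) none 2 = some (everyOther xs.tail) := by
  simp only [PySem.List.slice?, PySem.List.sliceIndices]
  norm_num
  rcases Nat.lt_or_ge 1 xs.length with h | h
  · rw [if_pos h]
    have hmin : min (1 : Int) (xs.length : Int) = 1 := by omega
    rw [hmin]
    have hc : (((xs.length : Int) - 1 + 2 - 1) / 2).toNat = xs.length / 2 := by omega
    rw [hc, filterMap_odd]
  · rw [if_neg (by omega)]
    interval_cases h' : xs.length
    · have : xs = [] := List.eq_nil_of_length_eq_zero h'
      subst this; simp [everyOther]
    · match xs, h' with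
      | [x], _ => simp [everyOther]

def pairsOf {α : Type} : List α → List (α × α)
  | [] => []
  | [_] => []
  | x :: y :: t => (x, y) :: pairsOf t

lemma everyOther_cons_tail {α : Type} (y : α) (t : List α) :
    everyOther (y :: t) = y :: everyOther t.tail := by
  cases t <;> simp [everyOther]

lemma zip_everyOther {α : Type} (xs : List α) :
    (everyOther xs).zip (everyOther xs.tail) = pairsOf xs := by
  induction xs using pairsOf.induct with
  | case1 => simp [everyOther, pairsOf]
  | case2 x => simp [everyOther, pairsOf]
  | case3 x y t ih =>
    simp only [everyOther, List.tail_cons, everyOther_cons_tail, List.zip_cons_cons, pairsOf]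
    rw [ih]

lemma length_pairsOf {α : Type} (xs : List α) : (pairsOf xs).length = xs.length / 2 := by
  induction xs using pairsOf.induct with
  | case1 => simp [pairsOf]
  | case2 x => simp [pairsOf]
  | case3 x y t ih => simp [pairsOf, ih]; omega

lemma getElem_pairsOf {α : Type} (xs : List α) (i : Nat) (hi : i < (pairsOf xs).length)
    (h1 : 2 * i < xs.length) (h2 : 2 * i + 1 < xs.length) :
    (pairsOf xs)[i] = (xs[2 * i], xs[2 * i + 1]) := by
  induction xs using pairsOf.induct generalizing i with
  | case1 => simp [pairsOf] at hi
  | case2 x => simp [pairsOf] at hi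
  | case3 x y t ih =>
    cases i with
    | zero => simp [pairsOf]
    | succ j =>
      simp only [pairsOf] at hi ⊢
      rw [List.getElem_cons_succ]
      rw [ih j (by simpa using hi) (by simp at h1 ⊢; omega) (by simp at h2 ⊢; omega)]
      have e1 : 2 * (j + 1) = (2 * j) + 2 := by omega
      simp [e1]

-- B's pair list equals the (swapped) reverse of A's newest-first pair list
lemma pairsB_eq (ch : List String) :
    (List.range (ch.length / 2)).map (fun (j : Nat) =>
      (PySem.List.pyGetD ch ((ch.length % 2 + 2 * j : Nat) : Int) "",
       PySem.List.pyGetD ch ((ch.length % 2 + 2 * j + 1 : Nat) : Int) "")) =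
    ((pairsOf ch.reverse).map Prod.swap).reverse := by
  apply List.ext_getElem
  · simp [length_pairsOf]
  · intro j h1 h2
    have hj : j < ch.length / 2 := by simpa using h1
    have hlen : (pairsOf ch.reverse).length = ch.length / 2 := by simp [length_pairsOf]
    simp only [List.getElem_map, List.getElem_range, List.getElem_reverse, List.length_map]
    have hilt : (pairsOf ch.reverse).length - 1 - j < (pairsOf ch.reverse).length := by omega
    rw [getElem_pairsOf ch.reverse ((pairsOf ch.reverse).length - 1 - j) hilt
      (by simp [hlen]; omega) (by simp [hlen]; omega)]
    have e1 : (ch.length % 2 + 2 * j : Nat) < ch.length := by omega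
    have e2 : (ch.length % 2 + 2 * j + 1 : Nat) < ch.length := by omega
    rw [PySem.List.pyGetD_natCast, PySem.List.pyGetD_natCast,
      List.getD_eq_getElem _ _ e1, List.getD_eq_getElem _ _ e2]
    simp only [Prod.swap, List.getElem_reverse, Prod.mk.injEq]
    constructor
    · congr 1; simp [hlen]; omega
    · congr 1; simp [hlen]; omega

lemma join_empty_cons (p : String) (parts : List String) :
    PySem.Str.join "" (p :: parts) = p ++ PySem.Str.join "" parts := by
  cases parts with
  | nil =>
    simp [PySem.Str.join, PySem.Chars.join_singleton, PySem.Chars.join_nil]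
  | cons q rest =>
    simp [PySem.Str.join, PySem.Chars.join_cons_cons]

lemma join_empty_append_singleton (parts : List String) (s : String) :
    PySem.Str.join "" (parts ++ [s]) = PySem.Str.join "" parts ++ s := by
  induction parts with
  | nil => simp [PySem.Str.join, PySem.Chars.join_nil]
  | cons p rest ih => rw [List.cons_append, join_empty_cons, ih, join_empty_cons, String.append_assoc]

-- break-style cutoff over a plain count list (used only in the proofs)
def pvCutC (m : Int) : List Int → Int → Nat
  | [], _ => 0
  | c :: rest, t => if c + t > m then 0 else pvCutC m rest (t + c) + 1

lemma loop_eq (m : Int) (l : List (String × String)) : ∀ (acc : String) (total : Int),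
    pvALoop m l acc total =
      PySem.Str.join "" (((l.take (pvCutC m (l.map (fun pr => pvWc pr.2 pr.1)) total)).reverse).map
        (fun pr => "\n" ++ pr.2 ++ " " ++ pr.1 ++ "\n")) ++ acc := by
  induction l with
  | nil =>
    intro acc total
    simp [pvALoop, pvCutC, PySem.Str.join, PySem.Chars.join_nil, String.empty_append]
  | cons pr rest ih =>
    intro acc total
    obtain ⟨r, p⟩ := pr
    simp only [pvALoop, pvCutC, List.map_cons]
    by_cases h : pvWc p r + total > m
    · rw [if_pos (by simpa [pvWc] using h), if_pos h]
      simp [PySem.Str.join, PySem.Chars.join_nil, String.empty_append]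
    · rw [if_neg (by simpa [pvWc] using h), if_neg h, ih]
      rw [List.take_succ_cons, List.reverse_cons, List.map_append]
      simp only [List.map_cons, List.map_nil]
      rw [join_empty_append_singleton]
      simp [pvWc, String.append_assoc]

lemma cut_full (m : Int) (cs : List Int) : ∀ (t : Int), (∀ c ∈ cs, 0 ≤ c) → t + cs.sum ≤ m →
    pvCutC m cs t = cs.length := by
  induction cs with
  | nil => intro t _ _; simp [pvCutC]
  | cons c rest ih =>
    intro t hnn hs
    have hrest : (0 : Int) ≤ rest.sum :=
      List.sum_nonneg (fun x hx => hnn x (List.mem_cons_of_mem _ hx))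
    simp only [List.sum_cons] at hs
    rw [pvCutC, if_neg (by omega)]
    rw [ih (t + c) (fun x hx => hnn x (List.mem_cons_of_mem _ hx)) (by omega)]
    simp

lemma cut_snoc (m : Int) (cs : List Int) (c : Int) : ∀ (t : Int),
    pvCutC m (cs ++ [c]) t =
      pvCutC m cs t + (if pvCutC m cs t = cs.length ∧ t + cs.sum + c ≤ m then 1 else 0) := by
  induction cs with
  | nil =>
    intro t
    rw [List.nil_append]
    simp only [pvCutC, List.length_nil, List.sum_nil]
    by_cases h : c + t > m
    · rw [if_pos h, if_neg (fun hx => absurd hx.2 (by omega))]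
    · rw [if_neg h, if_pos ⟨trivial, by omega⟩]
  | cons a rest ih =>
    intro t
    simp only [List.cons_append, pvCutC, List.length_cons, List.sum_cons]
    by_cases h : a + t > m
    · simp only [if_pos h]
      rw [if_neg (fun hx => absurd hx.1 (by omega))]
    · simp only [if_neg h]
      rw [ih (t + a)]
      by_cases h2 : pvCutC m rest (t + a) = rest.length ∧ t + a + rest.sum + c ≤ m
      · rw [if_pos h2, if_pos ⟨by rw [h2.1], by have := h2.2; omega⟩]
      · rw [if_neg h2, if_neg (fun hx => h2 ⟨by have := hx.1; omega, by have := hx.2; omega⟩)]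

lemma drop_cut (m : Int) (cs : List Int) (hnn : ∀ c ∈ cs, 0 ≤ c) : ∀ (t : Int),
    pvDropOld m cs (t + cs.sum) + pvCutC m cs.reverse t = cs.length := by
  induction cs with
  | nil => intro t; simp [pvDropOld, pvCutC]
  | cons c rest ih =>
    intro t
    have hnr : ∀ x ∈ rest, (0 : Int) ≤ x := fun x hx => hnn x (List.mem_cons_of_mem _ hx)
    have hc : (0 : Int) ≤ c := hnn c (List.mem_cons_self ..)
    simp only [List.sum_cons, pvDropOld, List.reverse_cons, List.length_cons]
    rw [cut_snoc]
    by_cases h : t + (c + rest.sum) > m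
    · rw [if_pos h, if_neg (by
        intro hx
        have := hx.2
        rw [List.sum_reverse] at this
        omega)]
      have e : t + (c + rest.sum) - c = t + rest.sum := by omega
      rw [e]
      have := ih hnr t
      omega
    · rw [if_neg h]
      have hfull : pvCutC m rest.reverse t = rest.reverse.length := by
        apply cut_full
        · intro x hx; exact hnr x (List.mem_reverse.mp hx)
        · rw [List.sum_reverse]; omega
      rw [if_pos (by
        constructor
        · simpa using hfull
        · rw [List.sum_reverse]; omega)]
      simp at hfull ⊢
      omega

lemma cut_le_length (m : Int) (cs : List Int) : ∀ (t : Int), pvCutC m cs t ≤ cs.length := by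
  induction cs with
  | nil => intro t; simp [pvCutC]
  | cons c rest ih =>
    intro t
    simp only [pvCutC, List.length_cons]
    split_ifs
    · omega
    · have := ih (t + c); omega

lemma join_ne_empty (p q : String) (parts : List String) :
    PySem.Str.join "" (("\n" ++ p ++ " " ++ q ++ "\n") :: parts) ≠ "" := by
  rw [join_empty_cons]
  intro h
  have := congrArg String.length h
  simp [String.length_append] at this

lemma main_eq (ch : List String) (m : Int) :
    make_safe_history_py ch m = make_safe_history_py_alt ch m := by
  unfold make_safe_history_py make_safe_history_py_alt
  simp only []
  rw [slice_even, slice_odd, Option.getD_some, Option.getD_some, zip_everyOther, loop_eq,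
    String.append_empty, pairsB_eq]
  set R := pairsOf ch.reverse with hR
  set P := (R.map Prod.swap).reverse with hP
  -- counts relation
  have hcounts : P.map (fun pr => pvWc pr.1 pr.2) = (R.map (fun pr => pvWc pr.2 pr.1)).reverse := by
    rw [hP, List.map_reverse, List.map_map]
    rfl
  set counts := P.map (fun pr => pvWc pr.1 pr.2) with hco
  have hnn : ∀ c ∈ counts, (0 : Int) ≤ c := by
    intro c hc
    rw [hco] at hc
    obtain ⟨pr, _, rfl⟩ := List.mem_map.mp hc
    simp only [pvWc]
    positivity
  set k := pvCutC m (R.map (fun pr => pvWc pr.2 pr.1)) 0 with hk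
  set j := pvDropOld m counts counts.sum with hj
  have hrev : counts.reverse = R.map (fun pr => pvWc pr.2 pr.1) := by rw [hcounts]; simp
  have hjk : j + k = counts.length := by
    have := drop_cut m counts hnn 0
    rw [hrev] at this
    simpa [hj, hk] using this
  have hlenP : counts.length = P.length := by simp [hco]
  have hlenR : R.length = P.length := by simp [hP]
  have hkle : k ≤ R.length := by
    have := cut_le_length m (R.map (fun pr => pvWc pr.2 pr.1)) 0
    simpa [hk] using this
  -- kept pairs
  have hRP : R = (P.reverse).map Prod.swap := by
    rw [hP]
    simp [List.map_map, Function.comp_def]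
  have hkept : (R.take k).reverse = (P.drop j).map Prod.swap := by
    rw [hRP, ← List.map_take, ← List.map_reverse, List.take_reverse, List.reverse_reverse]
    congr 2
    simp at hlenP
    omega
  rw [hkept, List.map_map]
  have hfmt : ((fun pr : String × String => "\n" ++ pr.2 ++ " " ++ pr.1 ++ "\n") ∘ Prod.swap) =
      (fun pr : String × String => "\n" ++ pr.1 ++ " " ++ pr.2 ++ "\n") := by
    funext pr; rfl
  rw [hfmt]
  set parts := (P.drop j).map (fun pr : String × String => "\n" ++ pr.1 ++ " " ++ pr.2 ++ "\n")
    with hparts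
  cases hp : parts with
  | nil =>
    simp [PySem.Str.join, PySem.Chars.join_nil]
  | cons p rest =>
    have hpo : ∃ q1 q2, p = "\n" ++ q1 ++ " " ++ q2 ++ "\n" := by
      have : p ∈ parts := by rw [hp]; exact List.mem_cons_self ..
      rw [hparts] at this
      obtain ⟨pr, _, rfl⟩ := List.mem_map.mp this
      exact ⟨pr.1, pr.2, rfl⟩
    obtain ⟨q1, q2, rfl⟩ := hpo
    rw [if_neg (join_ne_empty q1 q2 rest), if_neg (by simp)]
    rw [join_empty_append_singleton]

-- ===== VERDICT (by name: the statement is the Claim_ definition above) =====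
theorem make_safe_history_py_spec : Claim_equal_make_safe_history_py := by
  intro ch m _
  unfold Spec_make_safe_history_py
  exact main_eq ch m
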